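-- pv_equiv track=rewrite | github.com/posl/comment_recommendation | script/mod_gen/1_time/zh/121_D/6.py | f
-- ===== SOURCE A (Python) =====
-- def f(a, b):
--     if a == b:
--         return a
--     elif a == b - 1:
--         return a ^ b
--     elif a % 2 == 0 and b % 2 == 0:
--         return f(a >> 1, b >> 1) << 1
--     elif a % 2 == 0 and b % 2 == 1:
--         return (f(a >> 1, b >> 1) << 1) + 1
--     elif a % 2 == 1 and b % 2 == 0:
--         return (f(a >> 1, b >> 1) << 1) + 1
--     else:
--         return (f(a >> 1, b >> 1) << 1) + 2
-- ===== SOURCE B (Python) =====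
-- def f(a, b):
--     bits = []
--     while not (a == b or a == b - 1):
--         bits.append((a % 2) + (b % 2))
--         a >>= 1
--         b >>= 1
--     res = a if a == b else a ^ b
--     for bit in reversed(bits):
--         res = (res << 1) + bit
--     return res
-- ===== Notes on version B (the rewrite author's own statement) =====
-- stated objective: alternative
-- what changed: Replaced the recursive halving with an explicit iterative loop that collects the low-bit corrections (a%2)+(b%2) into a list and then rebuilds the result MSB-first by folding the collected bits onto the base case.
-- outside the precondition, e.g. on f(0, -1): A raises RecursionError, B does not finish within the time limit
import Mathlib
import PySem

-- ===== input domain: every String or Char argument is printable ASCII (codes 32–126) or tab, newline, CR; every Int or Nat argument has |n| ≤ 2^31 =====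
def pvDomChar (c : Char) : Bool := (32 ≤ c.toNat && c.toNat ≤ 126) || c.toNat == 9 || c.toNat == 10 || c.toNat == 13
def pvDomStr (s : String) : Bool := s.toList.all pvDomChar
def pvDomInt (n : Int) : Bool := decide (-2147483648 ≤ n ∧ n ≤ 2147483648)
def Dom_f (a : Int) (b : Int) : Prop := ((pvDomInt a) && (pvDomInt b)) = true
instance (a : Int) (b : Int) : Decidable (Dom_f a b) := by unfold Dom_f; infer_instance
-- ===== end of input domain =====

-- One honest line: B is an iterative reformulation (collect the low-bit corrections, then fold
-- them back MSB-first) of A's recursion; same cost, different decomposition ("alternative").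

-- ===== PORT A =====
-- Fuel is only a totality guard: on every input admitted by Pre_f the recursion stops
-- long before the fuel (2^33 exceeds any possible recursion depth on Dom_f) runs out.
def fRec : Nat → Int → Int → Int
  | 0, _, _ => 0
  | n+1, a, b =>
    if a = b then a
    else if a = b - 1 then PySem.Int.bxor a b
    else if PySem.Int.mod a 2 = 0 ∧ PySem.Int.mod b 2 = 0 then
      (fRec n (a >>> (1 : Nat)) (b >>> (1 : Nat))) <<< (1 : Nat)
    else if PySem.Int.mod a 2 = 0 ∧ PySem.Int.mod b 2 = 1 then
      ((fRec n (a >>> (1 : Nat)) (b >>> (1 : Nat))) <<< (1 : Nat)) + 1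
    else if PySem.Int.mod a 2 = 1 ∧ PySem.Int.mod b 2 = 0 then
      ((fRec n (a >>> (1 : Nat)) (b >>> (1 : Nat))) <<< (1 : Nat)) + 1
    else ((fRec n (a >>> (1 : Nat)) (b >>> (1 : Nat))) <<< (1 : Nat)) + 2

def f (a : Int) (b : Int) : Int := fRec 8589934592 a b

-- ===== PORT B =====
-- the while loop of Source B (same fuel guard); returns the appended bits and the final a, b
def loopB : Nat → Int → Int → (List Int × Int × Int)
  | 0, a, b => ([], a, b)
  | n+1, a, b =>
    if a = b ∨ a = b - 1 then ([], a, b)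
    else
      let r := loopB n (a >>> (1 : Nat)) (b >>> (1 : Nat))
      ((PySem.Int.mod a 2 + PySem.Int.mod b 2) :: r.1, r.2)

def f_alt (a : Int) (b : Int) : Int :=
  let r := loopB 8589934592 a b
  let res := if r.2.1 = r.2.2 then r.2.1 else PySem.Int.bxor r.2.1 r.2.2
  -- 'for bit in reversed(bits)': r.1 holds the bits in append order (lowest first)
  (r.1.reverse).foldl (fun (res bit : Int) => (res <<< (1 : Nat)) + bit) res

-- ===== PRECONDITION & SPEC =====
-- Pre_f excludes exactly the inputs with a ≥ 0 ∧ b < 0, on which A recurses forever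
-- (Python raises RecursionError): the pair converges to (0, -1), never meeting a stop case.
def Pre_f (a : Int) (b : Int) : Prop := a < 0 ∨ 0 ≤ b
instance (a : Int) (b : Int) : Decidable (Pre_f a b) := by unfold Pre_f; infer_instance
def pvWitness_f : Int × Int := (6, 25)
def Spec_f (a : Int) (b : Int) (out : Int) : Prop := out = f_alt a b
instance (a : Int) (b : Int) (out : Int) : Decidable (Spec_f a b out) := by unfold Spec_f; infer_instance

-- ===== CLAIM (what is proved, stated in full; the proofs are below) =====
def Claim_equal_f : Prop := ∀ (a : Int) (b : Int), Dom_f a b → Pre_f a b → Spec_f a b (f a b)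

-- ===== LEMMAS AND PROOFS =====

-- B's finishing step (base value, then fold the collected bits back, MSB first)
def finishB (r : List Int × Int × Int) : Int :=
  let res := if r.2.1 = r.2.2 then r.2.1 else PySem.Int.bxor r.2.1 r.2.2
  (r.1.reverse).foldl (fun (res bit : Int) => (res <<< (1 : Nat)) + bit) res

theorem f_alt_eq_finishB (a b : Int) : f_alt a b = finishB (loopB 8589934592 a b) := rfl

theorem shiftRight_one (a : Int) : a >>> (1 : Nat) = a / 2 := by
  simp [Int.shiftRight_eq_div_pow]

theorem mod2 (a : Int) : PySem.Int.mod a 2 = a % 2 :=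
  PySem.Int.mod_eq_emod_of_pos (by norm_num)

theorem finishB_cons (bit : Int) (bs : List Int) (p : Int × Int) :
    finishB ((bit :: bs, p)) = (finishB (bs, p)) <<< (1 : Nat) + bit := by
  simp [finishB, List.foldl_append]

-- one non-stop step of A's recursion, written as B's recurrence
theorem fRec_step (n : Nat) (a b : Int) (hne : a ≠ b) (hne2 : a ≠ b - 1) :
    fRec (n + 1) a b =
      fRec n (a / 2) (b / 2) <<< (1 : Nat) + (PySem.Int.mod a 2 + PySem.Int.mod b 2) := by
  simp only [fRec, if_neg hne, if_neg hne2, mod2, shiftRight_one, Int.shiftLeft_eq, pow_one]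
  split_ifs with h1 h2 h3 <;> omega

-- one non-stop step of B's loop
theorem loopB_step (n : Nat) (a b : Int) (hne : a ≠ b) (hne2 : a ≠ b - 1) :
    loopB (n + 1) a b =
      ((PySem.Int.mod a 2 + PySem.Int.mod b 2) :: (loopB n (a / 2) (b / 2)).1,
        (loopB n (a / 2) (b / 2)).2) := by
  have hstop : ¬ (a = b ∨ a = b - 1) := by tauto
  simp [loopB, hstop, shiftRight_one]

-- fRec with enough fuel equals B's finish of loopB with the same fuel
theorem fRec_eq_loopB (n : Nat) : ∀ (a b : Int),
    a.natAbs + b.natAbs < n → Pre_f a b →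
    fRec n a b = finishB (loopB n a b) := by
  induction n with
  | zero => intro a b h _; omega
  | succ n ih =>
    intro a b h hpre
    by_cases hne : a = b
    · subst hne; simp [fRec, loopB, finishB]
    · by_cases hne2 : a = b - 1
      · simp [fRec, loopB, finishB, hne2]
      · have hpre2 : a < 0 ∨ 0 ≤ b := hpre
        have hdec : (a / 2).natAbs + (b / 2).natAbs < n := by omega
        have hpre' : Pre_f (a / 2) (b / 2) := by
          simp only [Pre_f] at hpre2 ⊢; omega
        have hIH := ih (a / 2) (b / 2) hdec hpre'
        rw [fRec_step n a b hne hne2, loopB_step n a b hne hne2]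
        have hfin := finishB_cons (PySem.Int.mod a 2 + PySem.Int.mod b 2)
          (loopB n (a / 2) (b / 2)).1 (loopB n (a / 2) (b / 2)).2
        rw [show ((loopB n (a / 2) (b / 2)).1, (loopB n (a / 2) (b / 2)).2) =
              loopB n (a / 2) (b / 2) from rfl] at hfin
        rw [hfin, hIH]

-- ===== VERDICT (by name: the statement is the Claim_ definition above) =====
theorem f_spec : Claim_equal_f := by
  intro a b hdom hpre
  have hb : a.natAbs + b.natAbs < 8589934592 := by
    simp only [Dom_f, pvDomInt, Bool.and_eq_true, decide_eq_true_eq] at hdom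
    omega
  show f a b = f_alt a b
  rw [f_alt_eq_finishB]
  exact fRec_eq_loopB 8589934592 a b hb hpre
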